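-- pv_equiv track=rewrite | github.com/Muacca/DPPUv2-paper03ec | script/dppu/utils/levi_civita.py | levi_civita_nd
-- ===== SOURCE A (Python) =====
-- from typing import Tuple
--
-- def levi_civita_nd(indices: Tuple[int, ...]) -> int:
--     """
--     N-dimensional Levi-Civita symbol.
--
--     Generalization to arbitrary dimension.
--
--     Args:
--         indices: Tuple of n indices, each in {0, 1, ..., n-1}
--
--     Returns:
--         +1, -1, or 0
--
--     Examples:
--         >>> levi_civita_nd((0, 1))
--         1
--         >>> levi_civita_nd((0, 1, 2, 3, 4))
--         1
--     """
--     n = len(indices)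
--
--     # Check for repeated indices
--     if len(set(indices)) != n:
--         return 0
--
--     # Count inversions
--     inversions = 0
--     for i in range(n):
--         for j in range(i + 1, n):
--             if indices[i] > indices[j]:
--                 inversions += 1
--
--     return 1 if inversions % 2 == 0 else -1
-- ===== SOURCE B (Python) =====
-- def _msort(l):
--     """Merge sort returning (sorted list, number of inversions)."""
--     if len(l) <= 1:
--         return l, 0
--     mid = len(l) // 2
--     left, c1 = _msort(l[:mid])
--     right, c2 = _msort(l[mid:])
--     merged = []
--     i = j = cross = 0
--     while i < len(left) and j < len(right):
--         if left[i] <= right[j]: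
--             merged.append(left[i])
--             i += 1
--         else:
--             merged.append(right[j])
--             j += 1
--             cross += len(left) - i
--     merged.extend(left[i:])
--     merged.extend(right[j:])
--     return merged, c1 + c2 + cross
--
--
-- def levi_civita_nd(indices):
--     srt, inv = _msort(list(indices))
--     if any(a == b for a, b in zip(srt, srt[1:])):
--         return 0
--     return -1 if inv % 2 == 1 else 1
-- ===== Notes on version B (the rewrite author's own statement) =====
-- stated objective: alternative
-- what changed: Replaces the O(n^2) double loop over index pairs (plus a set-based duplicate check) by a single merge sort that counts inversions while sorting and detects duplicates from the sorted output.
import Mathlib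
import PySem

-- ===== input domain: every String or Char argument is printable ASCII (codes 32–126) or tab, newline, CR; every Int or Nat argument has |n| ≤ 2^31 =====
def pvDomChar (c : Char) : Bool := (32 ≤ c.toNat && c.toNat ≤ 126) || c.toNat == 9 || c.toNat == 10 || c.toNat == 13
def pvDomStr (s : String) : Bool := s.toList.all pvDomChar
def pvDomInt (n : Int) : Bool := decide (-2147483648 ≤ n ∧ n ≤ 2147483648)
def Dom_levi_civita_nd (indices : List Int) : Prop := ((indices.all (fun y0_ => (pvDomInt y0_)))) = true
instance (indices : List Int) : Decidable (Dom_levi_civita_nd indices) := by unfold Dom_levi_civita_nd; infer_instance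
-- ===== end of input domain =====

-- B replaces A's double loop over index pairs by a merge sort that counts inversions
-- while sorting and reads duplicates off the sorted output (objective: alternative).

-- ===== PORT A =====
def levi_civita_nd (indices : List Int) : Int :=
  let n : Int := PySem.List.len indices
  if PySem.List.len (PySem.Set.ofList indices) ≠ n then 0
  else
    let inversions : Int :=
      (PySem.List.pyRange 0 n).foldl
        (fun acc i =>
          (PySem.List.pyRange (i + 1) n).foldl
            (fun acc2 j =>
              if PySem.List.pyGetD indices i 0 > PySem.List.pyGetD indices j 0 then acc2 + 1
              else acc2)
            acc)
        0
    if PySem.Int.mod inversions 2 = 0 then 1 else -1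

-- ===== PORT B =====
-- merge step of Source B's _msort: merges two lists, counting crossing inversions
-- (Python's index-based while loop, written as structural recursion; the Nat fuel
-- only makes the recursion structural — it is always sufficient and never alters the result)
def mergeCountF : Nat → List Int → List Int → List Int × Nat
  | _, [], ys => (ys, 0)
  | _, x :: xs, [] => (x :: xs, 0)
  | 0, xs, ys => (xs ++ ys, 0)
  | fuel + 1, x :: xs, y :: ys =>
    if x ≤ y then
      let r := mergeCountF fuel xs (y :: ys)
      (x :: r.1, r.2)
    else
      let r := mergeCountF fuel (x :: xs) ys
      (y :: r.1, r.2 + (xs.length + 1))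

def mergeCount (xs ys : List Int) : List Int × Nat :=
  mergeCountF (xs.length + ys.length) xs ys

-- _msort of Source B: merge sort returning (sorted list, inversion count); fuel as above
def msortCountF : Nat → List Int → List Int × Nat
  | 0, l => (l, 0)
  | fuel + 1, l =>
    if l.length ≤ 1 then (l, 0)
    else
      let mid := l.length / 2
      let r1 := msortCountF fuel (l.take mid)
      let r2 := msortCountF fuel (l.drop mid)
      let m := mergeCount r1.1 r2.1
      (m.1, r1.2 + r2.2 + m.2)

def msortCount (l : List Int) : List Int × Nat := msortCountF l.length l

-- any(a == b for a, b in zip(srt, srt[1:]))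
def hasAdjEq : List Int → Bool
  | a :: b :: t => a == b || hasAdjEq (b :: t)
  | _ => false

def levi_civita_nd_alt (indices : List Int) : Int :=
  let r := msortCount indices
  if hasAdjEq r.1 then 0
  else if r.2 % 2 = 1 then -1 else 1

-- ===== PRECONDITION & SPEC =====
def Spec_levi_civita_nd (indices : List Int) (out : Int) : Prop := out = levi_civita_nd_alt indices
instance (indices : List Int) (out : Int) : Decidable (Spec_levi_civita_nd indices out) := by unfold Spec_levi_civita_nd; infer_instance

-- ===== CLAIM (what is proved, stated in full; the proofs are below) =====
def Claim_equal_levi_civita_nd : Prop := ∀ (indices : List Int), Dom_levi_civita_nd indices → Spec_levi_civita_nd indices (levi_civita_nd indices)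

-- ===== LEMMAS AND PROOFS =====

-- specification-level inversion count
def invCount : List Int → Nat
  | [] => 0
  | x :: xs => xs.countP (fun y => decide (y < x)) + invCount xs

-- crossing inversions between two blocks
def cross (xs ys : List Int) : Nat :=
  (xs.map (fun x => ys.countP (fun y => decide (y < x)))).sum

-- equation lemmas for the fuel-based ports
theorem mergeCountF_nil_left (fuel : Nat) (ys : List Int) :
    mergeCountF fuel [] ys = (ys, 0) := by
  cases fuel <;> rfl

theorem mergeCountF_nil_right (fuel : Nat) (x : Int) (xs : List Int) :
    mergeCountF fuel (x :: xs) [] = (x :: xs, 0) := by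
  cases fuel <;> rfl

theorem mergeCount_nil_left (ys : List Int) : mergeCount [] ys = (ys, 0) :=
  mergeCountF_nil_left _ ys

theorem mergeCount_nil_right (x : Int) (xs : List Int) :
    mergeCount (x :: xs) [] = (x :: xs, 0) :=
  mergeCountF_nil_right _ x xs

theorem mergeCount_cons_le {x y : Int} {xs ys : List Int} (h : x ≤ y) :
    mergeCount (x :: xs) (y :: ys)
      = (x :: (mergeCount xs (y :: ys)).1, (mergeCount xs (y :: ys)).2) := by
  show mergeCountF ((x :: xs).length + (y :: ys).length) _ _ = _
  rw [show (x :: xs).length + (y :: ys).length = (xs.length + (y :: ys).length) + 1 by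
    simp [List.length_cons]; omega]
  rw [mergeCountF, if_pos h]
  rfl

theorem mergeCount_cons_gt {x y : Int} {xs ys : List Int} (h : ¬ x ≤ y) :
    mergeCount (x :: xs) (y :: ys)
      = (y :: (mergeCount (x :: xs) ys).1, (mergeCount (x :: xs) ys).2 + (xs.length + 1)) := by
  show mergeCountF ((x :: xs).length + (y :: ys).length) _ _ = _
  rw [show (x :: xs).length + (y :: ys).length = ((x :: xs).length + ys.length) + 1 by
    simp [List.length_cons]; omega]
  rw [mergeCountF, if_neg h]
  rfl

theorem msortCountF_congr : ∀ (fuel fuel' : Nat) (l : List Int),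
    l.length ≤ fuel → l.length ≤ fuel' → msortCountF fuel l = msortCountF fuel' l := by
  intro fuel
  induction fuel with
  | zero =>
    intro fuel' l h _
    have hl : l = [] := List.length_eq_zero_iff.1 (Nat.le_zero.1 h)
    subst hl
    cases fuel' with
    | zero => rfl
    | succ f => rfl
  | succ f ihf =>
    intro fuel' l h h'
    cases fuel' with
    | zero =>
      have hl : l = [] := List.length_eq_zero_iff.1 (Nat.le_zero.1 h')
      subst hl
      rfl
    | succ f' =>
      by_cases h1 : l.length ≤ 1
      · simp only [msortCountF, if_pos h1]
      · simp only [msortCountF, if_neg h1]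
        have ht : (l.take (l.length / 2)).length ≤ f ∧ (l.take (l.length / 2)).length ≤ f' := by
          rw [List.length_take]; omega
        have hd : (l.drop (l.length / 2)).length ≤ f ∧ (l.drop (l.length / 2)).length ≤ f' := by
          rw [List.length_drop]; omega
        rw [ihf f' _ ht.1 ht.2, ihf f' _ hd.1 hd.2]

theorem msortCount_small {l : List Int} (h : l.length ≤ 1) : msortCount l = (l, 0) := by
  show msortCountF l.length l = (l, 0)
  match l, h with
  | [], _ => rfl
  | [a], _ => rfl

theorem msortCountF_succ (fuel : Nat) (l : List Int) (h : ¬ l.length ≤ 1) :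
    msortCountF (fuel + 1) l
      = ((mergeCount (msortCountF fuel (l.take (l.length / 2))).1
            (msortCountF fuel (l.drop (l.length / 2))).1).1,
          (msortCountF fuel (l.take (l.length / 2))).2 +
            (msortCountF fuel (l.drop (l.length / 2))).2 +
            (mergeCount (msortCountF fuel (l.take (l.length / 2))).1
              (msortCountF fuel (l.drop (l.length / 2))).1).2) := by
  simp only [msortCountF, if_neg h]

theorem msortCount_big {l : List Int} (h : ¬ l.length ≤ 1) :
    msortCount l
      = ((mergeCount (msortCount (l.take (l.length / 2))).1
            (msortCount (l.drop (l.length / 2))).1).1,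
          (msortCount (l.take (l.length / 2))).2 + (msortCount (l.drop (l.length / 2))).2 +
            (mergeCount (msortCount (l.take (l.length / 2))).1
              (msortCount (l.drop (l.length / 2))).1).2) := by
  show msortCountF l.length l = _
  obtain ⟨f, hf⟩ : ∃ f, l.length = f + 1 := ⟨l.length - 1, by omega⟩
  conv_lhs => rw [hf]
  rw [msortCountF_succ f l h]
  have ht : msortCountF f (l.take (l.length / 2)) = msortCount (l.take (l.length / 2)) := by
    apply msortCountF_congr
    · rw [List.length_take]; omega
    · exact le_refl _
  have hd : msortCountF f (l.drop (l.length / 2)) = msortCount (l.drop (l.length / 2)) := by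
    apply msortCountF_congr
    · rw [List.length_drop]; omega
    · exact le_refl _
  rw [ht, hd]

theorem invCount_append (xs ys : List Int) :
    invCount (xs ++ ys) = invCount xs + cross xs ys + invCount ys := by
  induction xs with
  | nil => simp [invCount, cross]
  | cons x xs ih =>
    simp only [List.cons_append, invCount, List.countP_append, cross, List.map_cons,
      List.sum_cons] at *
    omega

theorem cross_perm {xs xs' ys ys' : List Int} (hx : xs'.Perm xs) (hy : ys'.Perm ys) :
    cross xs' ys' = cross xs ys := by
  unfold cross
  rw [List.map_congr_left (fun a _ => hy.countP_eq (fun y => decide (y < a)))]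
  exact (hx.map _).sum_eq

theorem cross_nil_left (ys : List Int) : cross [] ys = 0 := rfl

theorem cross_nil_right (xs : List Int) : cross xs [] = 0 := by
  induction xs with
  | nil => rfl
  | cons x xs ih => simp only [cross, List.map_cons, List.countP_nil, List.sum_cons] at *; omega

theorem cross_cons_right (xs : List Int) (y : Int) (ys : List Int) :
    cross xs (y :: ys) = cross xs ys + xs.countP (fun z => decide (y < z)) := by
  induction xs with
  | nil => rfl
  | cons x xs ih =>
    simp only [cross, List.map_cons, List.sum_cons, List.countP_cons] at *
    omega

theorem mergeCount_spec : ∀ (xs ys : List Int),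
    xs.Pairwise (· ≤ ·) → ys.Pairwise (· ≤ ·) →
    (mergeCount xs ys).1.Perm (xs ++ ys) ∧ (mergeCount xs ys).1.Pairwise (· ≤ ·) ∧
      (mergeCount xs ys).2 = cross xs ys := by
  intro xs ys
  induction hn : xs.length + ys.length using Nat.strong_induction_on generalizing xs ys with
  | _ n ih =>
  intro hx hy
  cases xs with
  | nil =>
    rw [mergeCount_nil_left]
    exact ⟨by simp, hy, (cross_nil_left ys).symm⟩
  | cons x xs =>
    cases ys with
    | nil =>
      rw [mergeCount_nil_right]
      exact ⟨by simp, hx, (cross_nil_right (x :: xs)).symm⟩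
    | cons y ys =>
      by_cases hle : x ≤ y
      · obtain ⟨hp, hs, hc⟩ := ih (xs.length + (y :: ys).length)
          (by subst hn; simp only [List.length_cons]; omega) xs (y :: ys) rfl hx.of_cons hy
        rw [mergeCount_cons_le hle]
        refine ⟨?_, ?_, ?_⟩
        · simpa using hp.cons x
        · refine List.pairwise_cons.2 ⟨?_, hs⟩
          intro z hz
          rcases List.mem_append.1 (hp.mem_iff.1 hz) with h | h
          · exact (List.pairwise_cons.1 hx).1 z h
          · rcases List.mem_cons.1 h with rfl | h
            · exact hle
            · exact le_trans hle ((List.pairwise_cons.1 hy).1 z h)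
        · rw [hc]
          have h0 : (y :: ys).countP (fun z => decide (z < x)) = 0 := by
            refine List.countP_eq_zero.2 ?_
            intro a ha
            simp only [decide_eq_true_eq, not_lt]
            rcases List.mem_cons.1 ha with rfl | ha
            · exact hle
            · exact le_trans hle ((List.pairwise_cons.1 hy).1 a ha)
          simp only [cross, List.map_cons, List.sum_cons, h0]
          omega
      · obtain ⟨hp, hs, hc⟩ := ih ((x :: xs).length + ys.length)
          (by subst hn; simp only [List.length_cons]; omega) (x :: xs) ys rfl hx hy.of_cons
        rw [mergeCount_cons_gt hle]
        have hyx : y < x := lt_of_not_ge hle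
        refine ⟨?_, ?_, ?_⟩
        · exact (hp.cons y).trans (List.perm_middle (a := y) (l₁ := x :: xs) (l₂ := ys)).symm
        · refine List.pairwise_cons.2 ⟨?_, hs⟩
          intro z hz
          rcases List.mem_append.1 (hp.mem_iff.1 hz) with h | h
          · rcases List.mem_cons.1 h with rfl | h
            · exact le_of_lt hyx
            · exact le_trans (le_of_lt hyx) ((List.pairwise_cons.1 hx).1 z h)
          · exact (List.pairwise_cons.1 hy).1 z h
        · rw [hc, cross_cons_right]
          have hall : (x :: xs).countP (fun z => decide (y < z)) = (x :: xs).length := by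
            refine List.countP_eq_length.2 ?_
            intro a ha
            simp only [decide_eq_true_eq]
            rcases List.mem_cons.1 ha with rfl | ha
            · exact hyx
            · exact lt_of_lt_of_le hyx ((List.pairwise_cons.1 hx).1 a ha)
          rw [hall]
          simp

theorem msortCount_spec (l : List Int) :
    (msortCount l).1.Perm l ∧ (msortCount l).1.Pairwise (· ≤ ·) ∧
      (msortCount l).2 = invCount l := by
  induction hn : l.length using Nat.strong_induction_on generalizing l with
  | _ n ih =>
  subst hn
  by_cases h : l.length ≤ 1
  · rw [msortCount_small h]
    refine ⟨List.Perm.refl l, ?_, ?_⟩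
    · match l, h with
      | [], _ => exact List.Pairwise.nil
      | [a], _ => simp
    · match l, h with
      | [], _ => rfl
      | [a], _ => simp [invCount]
  · have h1 : (l.take (l.length / 2)).length < l.length := by
      rw [List.length_take]; omega
    have h2 : (l.drop (l.length / 2)).length < l.length := by
      rw [List.length_drop]; omega
    obtain ⟨p1, s1, c1⟩ := ih _ h1 _ rfl
    obtain ⟨p2, s2, c2⟩ := ih _ h2 _ rfl
    obtain ⟨pm, sm, cm⟩ := mergeCount_spec _ _ s1 s2
    rw [msortCount_big h]
    have htd : (l.take (l.length / 2) ++ l.drop (l.length / 2)).Perm l := by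
      rw [List.take_append_drop]
    refine ⟨pm.trans ((p1.append p2).trans htd), sm, ?_⟩
    simp only
    rw [cm, c1, c2, cross_perm p1 p2]
    conv_rhs => rw [← List.take_append_drop (l.length / 2) l]
    rw [invCount_append]
    omega

theorem hasAdjEq_sorted : ∀ {m : List Int}, m.Pairwise (· ≤ ·) →
    (hasAdjEq m = false ↔ m.Nodup)
  | [], _ => by simp [hasAdjEq]
  | [a], _ => by simp [hasAdjEq]
  | a :: b :: t, hm => by
    have ih := hasAdjEq_sorted (m := b :: t) hm.of_cons
    simp only [hasAdjEq, Bool.or_eq_false_iff, beq_eq_false_iff_ne, ne_eq]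
    constructor
    · rintro ⟨hne, hrec⟩
      refine List.nodup_cons.2 ⟨?_, ih.1 hrec⟩
      intro hmem
      rcases List.mem_cons.1 hmem with rfl | hmem
      · exact hne rfl
      · have h1 : a ≤ b := (List.pairwise_cons.1 hm).1 b (by simp)
        have h2 : b ≤ a := (List.pairwise_cons.1 hm.of_cons).1 a hmem
        exact hne (le_antisymm h1 h2)
    · intro hnd
      obtain ⟨hmem, htl⟩ := List.nodup_cons.1 hnd
      exact ⟨fun h => hmem (h ▸ List.mem_cons_self), ih.2 htl⟩

theorem length_ofList_eq_iff (xs : List Int) :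
    (PySem.Set.ofList xs).length = xs.length ↔ xs.Nodup := by
  constructor
  · intro h
    have hp : (PySem.Set.ofList xs).Perm xs.dedup :=
      (List.perm_ext_iff_of_nodup (PySem.Set.nodup_ofList xs) (List.nodup_dedup xs)).2
        (fun a => by rw [PySem.Set.mem_ofList, List.mem_dedup])
    have hlen : xs.dedup.length = xs.length := by rw [← hp.length_eq, h]
    exact List.dedup_eq_self.1 ((xs.dedup_sublist).eq_of_length hlen)
  · intro h; rw [PySem.Set.ofList_eq_self_of_nodup xs h]

theorem sum_range_cnt (l : List Int) :
    ((List.range l.length).map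
        (fun k => (((l.drop (k + 1)).countP (fun y => decide (y < l.getD k 0))) : Int))).sum
      = (invCount l : Int) := by
  induction l with
  | nil => simp [invCount]
  | cons x xs ih =>
    rw [List.length_cons, List.range_succ_eq_map, List.map_cons, List.map_map, List.sum_cons]
    have hrest : (List.range xs.length).map
        ((fun k => ((((x :: xs).drop (k + 1)).countP
            (fun y => decide (y < (x :: xs).getD k 0))) : Int)) ∘ Nat.succ)
        = (List.range xs.length).map
          (fun k => (((xs.drop (k + 1)).countP (fun y => decide (y < xs.getD k 0))) : Int)) := by
      refine List.map_congr_left ?_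
      intro k _
      simp only [Function.comp_apply, Nat.succ_eq_add_one, List.drop_succ_cons,
        List.getD_cons_succ]
    rw [hrest, ih]
    simp only [List.drop_succ_cons, List.drop_zero, List.getD_cons_zero, invCount]
    push_cast
    ring

theorem a_inversions_eq (l : List Int) :
    (List.foldl
        (fun acc i =>
          List.foldl
            (fun acc2 j =>
              if PySem.List.pyGetD l j 0 < PySem.List.pyGetD l i 0 then acc2 + 1 else acc2)
            acc (PySem.List.pyRange (i + 1) (l.length : Int)))
        0 (PySem.List.pyRange 0 (l.length : Int))) = (invCount l : Int) := by
  have hinner : ∀ (acc i : Int), 0 ≤ i →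
      List.foldl
        (fun acc2 j =>
          if PySem.List.pyGetD l j 0 < PySem.List.pyGetD l i 0 then acc2 + 1 else acc2)
        acc (PySem.List.pyRange (i + 1) (l.length : Int))
      = acc + (((l.drop (i + 1).toNat).countP
          (fun y => decide (y < PySem.List.pyGetD l i 0))) : Int) := by
    intro acc i hi
    rw [PySem.List.foldl_pyRange_pyGetD' l 0
      (fun acc2 y => if y < PySem.List.pyGetD l i 0 then acc2 + 1 else acc2) acc
      (by omega : (0 : Int) ≤ i + 1)]
    exact PySem.List.foldl_ite_add_one _ _ _
  rw [PySem.List.foldl_congr_mem _ _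
    (fun acc i => acc + (((l.drop (i + 1).toNat).countP
      (fun y => decide (y < PySem.List.pyGetD l i 0))) : Int)) 0
    (fun acc i hi => hinner acc i (PySem.List.mem_pyRange_one.1 hi).1)]
  rw [PySem.List.foldl_add]
  rw [PySem.List.pyRange_one, List.map_map]
  rw [show ((l.length : Int) - 0).toNat = l.length by omega]
  have hmap : (List.range l.length).map
      ((fun i => (((l.drop (i + 1).toNat).countP
          (fun y => decide (y < PySem.List.pyGetD l i 0))) : Int)) ∘ (fun k => (0 : Int) + ↑k))
      = (List.range l.length).map
        (fun k => (((l.drop (k + 1)).countP (fun y => decide (y < l.getD k 0))) : Int)) := by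
    refine List.map_congr_left ?_
    intro k _
    have h1 : ((0 : Int) + (k : Int)) = (k : Int) := by omega
    have h2 : ((k : Int) + 1).toNat = k + 1 := by omega
    simp only [Function.comp_apply, h1, h2, PySem.List.pyGetD_natCast]
  rw [hmap, sum_range_cnt]
  ring

theorem aEq (l : List Int) :
    levi_civita_nd l = if l.Nodup then (if invCount l % 2 = 1 then -1 else 1) else 0 := by
  unfold levi_civita_nd
  by_cases hnd : l.Nodup
  · have hc : ¬ PySem.List.len (PySem.Set.ofList l) ≠ PySem.List.len l := by
      simp only [PySem.List.len_eq, ne_eq, Nat.cast_inj, Decidable.not_not]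
      exact (length_ofList_eq_iff l).2 hnd
    rw [if_neg hc, if_pos hnd]
    simp only [PySem.List.len_eq, gt_iff_lt]
    rw [a_inversions_eq l, PySem.Int.mod_eq_emod_of_pos (by norm_num : (0 : Int) < 2)]
    rcases Nat.even_or_odd (invCount l) with he | ho
    · have h2 := Nat.even_iff.mp he
      rw [if_pos (by omega : ((invCount l : Int)) % 2 = 0), if_neg (by omega : ¬ invCount l % 2 = 1)]
    · have h2 := Nat.odd_iff.mp ho
      rw [if_neg (by omega : ¬ ((invCount l : Int)) % 2 = 0), if_pos h2]
  · have hc : PySem.List.len (PySem.Set.ofList l) ≠ PySem.List.len l := by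
      simp only [PySem.List.len_eq, ne_eq, Nat.cast_inj]
      exact fun h => hnd ((length_ofList_eq_iff l).1 h)
    rw [if_pos hc, if_neg hnd]

theorem altEq (l : List Int) :
    levi_civita_nd_alt l = if l.Nodup then (if invCount l % 2 = 1 then -1 else 1) else 0 := by
  unfold levi_civita_nd_alt
  obtain ⟨hperm, hsort, hcnt⟩ := msortCount_spec l
  by_cases hnd : l.Nodup
  · have hfa : hasAdjEq (msortCount l).1 = false :=
      (hasAdjEq_sorted hsort).2 (hperm.nodup_iff.2 hnd)
    rw [if_pos hnd, if_neg (by rw [hfa]; simp), hcnt]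
  · have hta : hasAdjEq (msortCount l).1 = true := by
      cases h : hasAdjEq (msortCount l).1
      · exact absurd (hperm.nodup_iff.1 ((hasAdjEq_sorted hsort).1 h)) hnd
      · rfl
    rw [if_neg hnd, if_pos hta]

-- ===== VERDICT (by name: the statement is the Claim_ definition above) =====
theorem levi_civita_nd_spec : Claim_equal_levi_civita_nd := by
  intro l _
  unfold Spec_levi_civita_nd
  rw [aEq, altEq]
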